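-- pv_equiv track=rewrite | github.com/enbanbunbun123/atcoder_python | 20240513_practice/ABC088B-cardGameForTwo.py | calcurate_card_game
-- ===== SOURCE A (Python) =====
-- def calcurate_card_game(N, cards):
--     cards.sort(reverse=True)
--
--     alice_score = 0
--     bob_score = 0
--
--     for i in range(N):
--         if i % 2 ==0:
--             alice_score += cards[i]
--         else:
--             bob_score += cards[i]
--
--     return alice_score - bob_score
-- ===== SOURCE B (Python) =====
-- def calcurate_card_game(N, cards):
--     cards.sort(reverse=True)
--     diff = 0
--     for i in reversed(range(N)):
--         diff = cards[i] - diff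
--     return diff
-- ===== Notes on version B (the rewrite author's own statement) =====
-- stated objective: alternative
-- what changed: Instead of A's two parity-indexed accumulators (alice/bob) filled by a forward scan, B walks the sorted indices BACKWARDS with a single sign-flipping accumulator diff = cards[i] - diff, so no parity test and no pair of scores exists anywhere.
import Mathlib
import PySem

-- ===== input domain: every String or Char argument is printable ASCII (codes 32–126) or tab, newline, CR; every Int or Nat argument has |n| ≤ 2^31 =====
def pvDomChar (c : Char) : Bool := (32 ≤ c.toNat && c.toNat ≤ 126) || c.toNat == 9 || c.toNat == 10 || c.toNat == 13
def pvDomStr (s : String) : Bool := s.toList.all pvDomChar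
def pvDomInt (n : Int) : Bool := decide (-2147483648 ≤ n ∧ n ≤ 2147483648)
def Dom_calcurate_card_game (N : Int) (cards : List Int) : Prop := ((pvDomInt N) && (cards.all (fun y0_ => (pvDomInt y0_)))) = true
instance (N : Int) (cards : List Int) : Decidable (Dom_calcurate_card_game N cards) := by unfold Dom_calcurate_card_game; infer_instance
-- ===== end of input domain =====

-- B replaces A's forward scan with two parity-indexed accumulators by a backward
-- scan with one sign-flipping accumulator diff = cards[i] - diff; objective: alternative.
-- Both A and B sort `cards` in place; the equivalence proved here is about the return value.

-- ===== PORT A =====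
def calcurate_card_game (N : Int) (cards : List Int) : Int :=
  let cards := PySem.List.sorted cards (fun x => x) true
  let p := (PySem.List.pyRange 0 N 1).foldl
    (fun (acc : Int × Int) i =>
      if i % 2 == 0 then (acc.1 + PySem.List.pyGetD cards i 0, acc.2)
      else (acc.1, acc.2 + PySem.List.pyGetD cards i 0)) (0, 0)
  p.1 - p.2

-- ===== PORT B =====
def calcurate_card_game_alt (N : Int) (cards : List Int) : Int :=
  let cards := PySem.List.sorted cards (fun x => x) true
  (PySem.List.pyRange 0 N 1).reverse.foldl
    (fun d i => PySem.List.pyGetD cards i 0 - d) 0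

-- ===== PRECONDITION & SPEC =====
-- Pre_ excludes exactly the inputs where A raises IndexError: N larger than len(cards).
def Pre_calcurate_card_game (N : Int) (cards : List Int) : Prop :=
  N ≤ (cards.length : Int)
instance (N : Int) (cards : List Int) : Decidable (Pre_calcurate_card_game N cards) := by
  unfold Pre_calcurate_card_game; infer_instance

def pvWitness_calcurate_card_game : Int × List Int := (3, [1, 7, 4])

def Spec_calcurate_card_game (N : Int) (cards : List Int) (out : Int) : Prop := out = calcurate_card_game_alt N cards
instance (N : Int) (cards : List Int) (out : Int) : Decidable (Spec_calcurate_card_game N cards out) := by unfold Spec_calcurate_card_game; infer_instance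

-- ===== CLAIM (what is proved, stated in full; the proofs are below) =====
def Claim_equal_calcurate_card_game : Prop := ∀ (N : Int) (cards : List Int), Dom_calcurate_card_game N cards → Pre_calcurate_card_game N cards → Spec_calcurate_card_game N cards (calcurate_card_game N cards)

-- ===== LEMMAS AND PROOFS =====

-- A's pair fold, expressed as a signed sum
theorem pvPairFold (g : Int → Int) (l : List Int) :
    ∀ (a b : Int),
      (l.foldl (fun (acc : Int × Int) i =>
        if i % 2 == 0 then (acc.1 + g i, acc.2) else (acc.1, acc.2 + g i)) (a, b)).1 -
      (l.foldl (fun (acc : Int × Int) i =>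
        if i % 2 == 0 then (acc.1 + g i, acc.2) else (acc.1, acc.2 + g i)) (a, b)).2
      = (a - b) + (l.map (fun i => if i % 2 == 0 then g i else -g i)).sum := by
  induction l with
  | nil => intro a b; simp
  | cons x t ih =>
      intro a b
      simp only [List.foldl_cons, List.map_cons, List.sum_cons]
      by_cases hx : x % 2 = 0
      · rw [if_pos (by simp [hx]), if_pos (by simp [hx]), ih]; ring
      · rw [if_neg (by simp [hx]), if_neg (by simp [hx]), ih]; ring

-- sum of a pointwise-negated map
theorem pvSumNeg (h : Int → Int) (l : List Int) :
    (l.map (fun i => -(h i))).sum = -(l.map h).sum := by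
  induction l with
  | nil => simp
  | cons x t ih => simp only [List.map_cons, List.sum_cons, ih]; ring

-- B's backward sign-flip fold = the parity-signed sum (signs measured from the left end a)
theorem pvFlipFold (g : Int → Int) (N : Int) :
    ∀ (fuel : Nat) (a : Int), (N - a).toNat ≤ fuel →
      (PySem.List.pyRange a N 1).reverse.foldl (fun d i => g i - d) 0
      = ((PySem.List.pyRange a N 1).map
          (fun i => if (i - a) % 2 == 0 then g i else -g i)).sum := by
  intro fuel
  induction fuel with
  | zero =>
      intro a hf
      rw [PySem.List.pyRange_one_eq_nil (by omega)]
      simp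
  | succ fuel ih =>
      intro a hf
      by_cases hend : N ≤ a
      · rw [PySem.List.pyRange_one_eq_nil hend]; simp
      · push_neg at hend
        rw [PySem.List.pyRange_one_cons hend]
        rw [List.foldl_reverse]
        simp only [List.foldr_cons, List.map_cons, List.sum_cons]
        rw [← List.foldl_reverse, ih (a + 1) (by omega)]
        have hflip : (PySem.List.pyRange (a + 1) N 1).map
            (fun i => if (i - a) % 2 == 0 then g i else -g i)
            = (PySem.List.pyRange (a + 1) N 1).map
                (fun i => -(if (i - (a + 1)) % 2 == 0 then g i else -g i)) := by
          apply List.map_congr_left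
          intro i _
          by_cases h : (i - (a + 1)) % 2 = 0
          · rw [if_neg (by simp; omega), if_pos (by simpa using h)]
          · rw [if_pos (by simp; omega), if_neg (by simpa using h)]; ring
        rw [hflip, pvSumNeg (fun i => if (i - (a + 1)) % 2 == 0 then g i else -g i),
            show a - a = 0 from by ring,
            if_pos (show (((0 : Int) % 2 == 0) = true) from by decide)]
        ring
-- ===== VERDICT (by name: the statement is the Claim_ definition above) =====
theorem calcurate_card_game_spec : Claim_equal_calcurate_card_game := by
  intro N cards _ _
  unfold Spec_calcurate_card_game calcurate_card_game calcurate_card_game_alt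
  simp only []
  rw [pvPairFold, pvFlipFold _ N N.toNat 0 (by omega)]
  simp
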